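-- pv_equiv track=rewrite | github.com/Maurice-AIEMPIRE/AIEmpire-Core | antigravity/unified_router.py | _route_to_agent
-- ===== SOURCE A (Python) =====
-- from typing import Any, Optional
--
-- def _route_to_agent(task: dict[str, Any]) -> str:
--     """Route task to the appropriate agent role."""
--     task_type = task.get("type", "code").lower()
--     prompt = task.get("prompt", "").lower()
--
--     if any(kw in task_type or kw in prompt
--            for kw in ["architecture", "refactor", "design", "structure"]):
--         return "architect"
--     elif any(kw in task_type or kw in prompt
--              for kw in ["bug", "error", "fix", "import", "traceback"]):
--         return "fixer"
--     elif any(kw in task_type or kw in prompt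
--              for kw in ["test", "qa", "review", "lint", "check"]):
--         return "qa"
--     elif any(kw in task_type or kw in prompt
--              for kw in ["research", "analyze", "scan", "trend"]):
--         return "architect"  # Research uses architect agent with research muscle
--     elif any(kw in task_type or kw in prompt
--              for kw in ["write", "content", "post", "tweet", "script"]):
--         return "coder"  # Creative uses coder agent with creative muscle
--     else:
--         return "coder"
-- ===== SOURCE B (Python) =====
-- _GROUPS = [
--     (["architecture", "refactor", "design", "structure"], "architect"),
--     (["bug", "error", "fix", "import", "traceback"], "fixer"),
--     (["test", "qa", "review", "lint", "check"], "qa"),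
--     (["research", "analyze", "scan", "trend"], "architect"),
--     (["write", "content", "post", "tweet", "script"], "coder"),
-- ]
-- # flat table keyword -> priority rank, plus rank -> role
-- KEYWORDS = [(kw, rank) for rank, (kws, _) in enumerate(_GROUPS) for kw in kws]
-- ROLES = [role for _, role in _GROUPS]
--
--
-- def _route_to_agent(task):
--     """Route task to agent role: minimise the priority rank over ALL matching
--     keywords of one flat table, then look the best rank up in a role table.
--     Correct because the first matching group in A's chain is exactly the group
--     of minimal rank containing a matching keyword."""
--     task_type = task.get("type", "code").lower()
--     prompt = task.get("prompt", "").lower()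
--     best = len(ROLES)
--     for kw, rank in KEYWORDS:
--         if rank < best and (kw in task_type or kw in prompt):
--             best = rank
--     return ROLES[best] if best < len(ROLES) else "coder"
-- ===== Notes on version B (the rewrite author's own statement) =====
-- stated objective: alternative
-- what changed: Replaces the short-circuiting if/elif chain of per-group any() scans with a single pass over one flat (keyword, rank) table that minimises the priority rank over all matching keywords, then indexes a role table with the best rank (default 'coder').
import Mathlib
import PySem

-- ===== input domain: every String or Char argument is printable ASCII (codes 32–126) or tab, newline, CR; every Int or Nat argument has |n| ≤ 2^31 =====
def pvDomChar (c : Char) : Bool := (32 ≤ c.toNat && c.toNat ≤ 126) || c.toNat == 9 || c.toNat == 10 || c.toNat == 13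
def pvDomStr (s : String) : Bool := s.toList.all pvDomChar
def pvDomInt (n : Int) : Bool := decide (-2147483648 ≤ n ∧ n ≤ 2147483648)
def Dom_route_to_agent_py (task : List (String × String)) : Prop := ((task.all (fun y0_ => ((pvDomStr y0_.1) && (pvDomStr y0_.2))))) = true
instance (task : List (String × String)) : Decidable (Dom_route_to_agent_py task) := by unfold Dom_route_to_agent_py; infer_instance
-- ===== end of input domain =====

-- B replaces A's if/elif chain with a single min-rank pass over one flat keyword table plus a role lookup (objective: alternative).


-- ===== PORT A =====
def route_to_agent_py (task : List (String × String)) : String :=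
  let task_type := PySem.Str.lower ((PySem.Dict.mk task).getD "type" "code")
  let prompt := PySem.Str.lower ((PySem.Dict.mk task).getD "prompt" "")
  if (["architecture", "refactor", "design", "structure"].any
      (fun kw => PySem.Str.isIn kw task_type || PySem.Str.isIn kw prompt)) then "architect"
  else if (["bug", "error", "fix", "import", "traceback"].any
      (fun kw => PySem.Str.isIn kw task_type || PySem.Str.isIn kw prompt)) then "fixer"
  else if (["test", "qa", "review", "lint", "check"].any
      (fun kw => PySem.Str.isIn kw task_type || PySem.Str.isIn kw prompt)) then "qa"
  else if (["research", "analyze", "scan", "trend"].any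
      (fun kw => PySem.Str.isIn kw task_type || PySem.Str.isIn kw prompt)) then "architect"
  else if (["write", "content", "post", "tweet", "script"].any
      (fun kw => PySem.Str.isIn kw task_type || PySem.Str.isIn kw prompt)) then "coder"
  else "coder"

-- ===== PORT B =====
-- flat (keyword, priority rank) table, built as in Source B from the five groups
def pvKeywords : List (String × Nat) :=
  (["architecture", "refactor", "design", "structure"].map (fun kw => (kw, 0))) ++
  (["bug", "error", "fix", "import", "traceback"].map (fun kw => (kw, 1))) ++
  (["test", "qa", "review", "lint", "check"].map (fun kw => (kw, 2))) ++
  (["research", "analyze", "scan", "trend"].map (fun kw => (kw, 3))) ++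
  (["write", "content", "post", "tweet", "script"].map (fun kw => (kw, 4)))

def pvRoles : List String := ["architect", "fixer", "qa", "architect", "coder"]

-- single pass minimising the rank over all matching keywords, then role lookup
def route_to_agent_py_alt (task : List (String × String)) : String :=
  let task_type := PySem.Str.lower ((PySem.Dict.mk task).getD "type" "code")
  let prompt := PySem.Str.lower ((PySem.Dict.mk task).getD "prompt" "")
  let best := pvKeywords.foldl
    (fun best p =>
      if p.2 < best && (PySem.Str.isIn p.1 task_type || PySem.Str.isIn p.1 prompt)
      then p.2 else best) pvRoles.length
  if best < pvRoles.length then pvRoles.getD best "coder" else "coder"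

-- ===== PRECONDITION & SPEC =====
def Spec_route_to_agent_py (task : List (String × String)) (out : String) : Prop := out = route_to_agent_py_alt task
instance (task : List (String × String)) (out : String) : Decidable (Spec_route_to_agent_py task out) := by unfold Spec_route_to_agent_py; infer_instance

-- ===== CLAIM (what is proved, stated in full; the proofs are below) =====
def Claim_equal_route_to_agent_py : Prop := ∀ (task : List (String × String)), Dom_route_to_agent_py task → Spec_route_to_agent_py task (route_to_agent_py task)

-- ===== LEMMAS AND PROOFS =====
-- folding the min-rank step over one constant-rank group from accumulator acc
theorem pvGroupFold (m : String → Bool) (ws : List String) (r acc : Nat) :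
    (ws.map (fun kw => (kw, r))).foldl
        (fun best p => if p.2 < best && m p.1 then p.2 else best) acc =
      if ws.any m && decide (r < acc) then r else acc := by
  induction ws generalizing acc with
  | nil => simp
  | cons w ws ih =>
    simp only [List.map_cons, List.foldl_cons, List.any_cons]
    rw [ih]
    by_cases hw : m w = true <;> by_cases hr : r < acc <;>
      by_cases ha : ws.any m = true <;> simp [hw, hr, ha]

theorem route_fold (m : String → Bool) :
    pvKeywords.foldl (fun best p => if p.2 < best && m p.1 then p.2 else best)
        pvRoles.length =
      if (["architecture", "refactor", "design", "structure"].any m) then 0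
      else if (["bug", "error", "fix", "import", "traceback"].any m) then 1
      else if (["test", "qa", "review", "lint", "check"].any m) then 2
      else if (["research", "analyze", "scan", "trend"].any m) then 3
      else if (["write", "content", "post", "tweet", "script"].any m) then 4
      else 5 := by
  show (
    (["architecture", "refactor", "design", "structure"].map (fun kw => (kw, 0))) ++
    (["bug", "error", "fix", "import", "traceback"].map (fun kw => (kw, 1))) ++
    (["test", "qa", "review", "lint", "check"].map (fun kw => (kw, 2))) ++
    (["research", "analyze", "scan", "trend"].map (fun kw => (kw, 3))) ++
    (["write", "content", "post", "tweet", "script"].map (fun kw => (kw, 4)))).foldl _ 5 = _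
  rw [List.foldl_append, List.foldl_append, List.foldl_append, List.foldl_append]
  rw [pvGroupFold, pvGroupFold, pvGroupFold, pvGroupFold, pvGroupFold]
  cases h0 : ["architecture", "refactor", "design", "structure"].any m <;>
  cases h1 : ["bug", "error", "fix", "import", "traceback"].any m <;>
  cases h2 : ["test", "qa", "review", "lint", "check"].any m <;>
  cases h3 : ["research", "analyze", "scan", "trend"].any m <;>
  cases h4 : ["write", "content", "post", "tweet", "script"].any m <;>
    simp

-- the if/elif chain equals min-rank fold + role lookup, for any match predicate m
theorem pvChains (m : String → Bool) :
    (if (["architecture", "refactor", "design", "structure"].any m) then "architect"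
     else if (["bug", "error", "fix", "import", "traceback"].any m) then "fixer"
     else if (["test", "qa", "review", "lint", "check"].any m) then "qa"
     else if (["research", "analyze", "scan", "trend"].any m) then "architect"
     else if (["write", "content", "post", "tweet", "script"].any m) then "coder"
     else "coder") =
    (if (pvKeywords.foldl (fun best p => if p.2 < best && m p.1 then p.2 else best)
          pvRoles.length) < pvRoles.length
     then pvRoles.getD (pvKeywords.foldl
          (fun best p => if p.2 < best && m p.1 then p.2 else best) pvRoles.length) "coder"
     else "coder") := by
  rw [route_fold]
  cases h0 : ["architecture", "refactor", "design", "structure"].any m <;>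
  cases h1 : ["bug", "error", "fix", "import", "traceback"].any m <;>
  cases h2 : ["test", "qa", "review", "lint", "check"].any m <;>
  cases h3 : ["research", "analyze", "scan", "trend"].any m <;>
  cases h4 : ["write", "content", "post", "tweet", "script"].any m <;>
    simp [pvRoles]

-- ===== VERDICT (by name: the statement is the Claim_ definition above) =====
theorem route_to_agent_py_spec : Claim_equal_route_to_agent_py := by
  intro task _
  exact pvChains _
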